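-- pv_equiv track=rewrite | github.com/hippie-cycling/CBFT | scripts/Gromark_transposition.py | highlight_dragged_crib
-- ===== SOURCE A (Python) =====
-- BLUE = '\033[38;5;21m'
--
-- RESET = '\033[0m'
--
-- def can_form_word(word: str, text: str) -> bool:
--     word = word.upper()
--     text = text.upper()
--     it = iter(text)
--     return all(c in it for c in word)
--
-- def highlight_dragged_crib(text: str, crib: str, color: str = BLUE) -> str:
--     text_lower = text.lower()
--     crib_lower = crib.lower()
--     if not can_form_word(crib_lower, text_lower):
--         return text
--     result_chars = list(text)
--     text_iter = iter(enumerate(text_lower))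
--     try:
--         for crib_char in crib_lower:
--             while True:
--                 index, text_char = next(text_iter)
--                 if text_char == crib_char:
--                     result_chars[index] = f"{color}{text[index]}{RESET}"
--                     break
--     except StopIteration:
--         pass
--     return "".join(result_chars)
-- ===== SOURCE B (Python) =====
-- BLUE = '\033[38;5;21m'
-- RESET = '\033[0m'
--
-- def highlight_dragged_crib(text: str, crib: str, color: str = BLUE) -> str:
--     # Index-table algorithm: build a dict mapping each lowered character to its
--     # (increasing) list of positions, then match the crib by binary-searching each
--     # character's position list for the first position after the previous match.
--     positions = {}
--     for i, ch in enumerate(text):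
--         positions.setdefault(ch.lower(), []).append(i)
--     matched = []
--     last = -1
--     for c in crib.lower():
--         lst = positions.get(c, [])
--         lo, hi = 0, len(lst)
--         while lo < hi:  # binary search: first position in lst strictly greater than last
--             mid = (lo + hi) // 2
--             if lst[mid] <= last:
--                 lo = mid + 1
--             else:
--                 hi = mid
--         if lo == len(lst):
--             return text
--         last = lst[lo]
--         matched.append(last)
--     chars = list(text)
--     for i in matched:
--         chars[i] = f"{color}{text[i]}{RESET}"
--     return "".join(chars)
-- ===== Notes on version B (the rewrite author's own statement) =====
-- stated objective: alternative
-- what changed: B replaces A's iterator-driven greedy scans (can_form_word pre-check plus a second scan) by an index-table algorithm: it builds a dict from each lowered character to its list of positions in one pass, then matches each crib character by binary-searching that character's position list for the first position after the previous match, wrapping the matched positions afterwards (or returning text unchanged on failure).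
import Mathlib
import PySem

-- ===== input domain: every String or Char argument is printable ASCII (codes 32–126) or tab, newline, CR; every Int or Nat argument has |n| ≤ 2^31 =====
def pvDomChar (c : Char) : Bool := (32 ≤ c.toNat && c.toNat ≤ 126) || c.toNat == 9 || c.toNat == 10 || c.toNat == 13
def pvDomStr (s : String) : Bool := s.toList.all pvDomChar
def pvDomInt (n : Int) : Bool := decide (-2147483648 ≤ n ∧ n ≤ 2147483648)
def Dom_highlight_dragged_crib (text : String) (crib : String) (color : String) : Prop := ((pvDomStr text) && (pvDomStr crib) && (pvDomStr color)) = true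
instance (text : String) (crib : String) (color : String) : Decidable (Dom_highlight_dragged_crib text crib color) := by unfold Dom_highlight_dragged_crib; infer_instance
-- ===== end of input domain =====

-- B replaces A's two iterator-driven greedy scans by an index table (dict: lowered char →
-- position list) queried with a hand-written binary search per crib character (objective: alternative).

-- ===== PORT A =====

-- `c in it` on a string iterator: consume chars until c is found; none = iterator exhausted
def pvSeekU (c : Char) : List Char → Option (List Char)
  | [] => none
  | t :: ts => if t == c then some ts else pvSeekU c ts

-- all(c in it for c in word)
def pvCfw : List Char → List Char → Bool
  | [], _ => true
  | c :: cs, ts =>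
    match pvSeekU c ts with
    | none => false
    | some ts' => pvCfw cs ts'

def can_form_word (word : String) (text : String) : Bool :=
  pvCfw (PySem.Str.upper word).toList (PySem.Str.upper text).toList

-- inner `while True: index, text_char = next(text_iter) …`: scan the enumerate iterator
def pvSeekE (c : Char) : List (Int × Char) → Option (Int × List (Int × Char))
  | [] => none
  | (i, t) :: ts => if t == c then some (i, ts) else pvSeekE c ts

-- `for crib_char in crib_lower` sharing text_iter; StopIteration ends the whole loop.
-- result_chars[index] = f"{color}{text[index]}{RESET}"; index from enumerate is in range.
def pvLoopA (text : String) (color : String) : List Char → List (Int × Char) → List String → List String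
  | [], _, rs => rs
  | c :: cs, it, rs =>
    match pvSeekE c it with
    | none => rs
    | some (i, it') =>
        pvLoopA text color cs it'
          (rs.set i.toNat (color ++ String.ofList [PySem.List.pyGetD text.toList i ' '] ++ "\x1b[0m"))

def highlight_dragged_crib (text : String) (crib : String) (color : String) : String :=
  let text_lower := PySem.Str.lower text
  let crib_lower := PySem.Str.lower crib
  if !(can_form_word crib_lower text_lower) then text
  else
    String.join
      (pvLoopA text color crib_lower.toList (PySem.List.enumerate text_lower.toList 0)
        (text.toList.map (fun ch => String.ofList [ch])))

-- ===== PORT B =====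

-- `for i, ch in enumerate(text): positions.setdefault(ch.lower(), []).append(i)`
-- (setdefault-then-append = d[k] = d.get(k, []) + [i], i.e. Dict.modify)
def pvPositions (text : String) : PySem.Dict Char (List Int) :=
  (PySem.List.enumerate text.toList 0).foldl
    (fun d p => d.modify (PySem.Chars.lowerChar p.2) [] (· ++ [p.1])) PySem.Dict.empty

-- the hand-written binary search: `while lo < hi: mid=(lo+hi)//2; …`
-- (lst[mid] is in range since mid < hi ≤ len(lst); lo, hi are nonnegative Python ints)
def pvBisect (lst : List Int) (last : Int) (lo hi : Nat) : Nat :=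
  if h : lo < hi then
    let mid := (lo + hi) / 2
    if lst.getD mid 0 ≤ last then pvBisect lst last (mid + 1) hi
    else pvBisect lst last lo mid
  else lo
termination_by hi - lo
decreasing_by all_goals omega

-- `for c in crib.lower(): …`; early `return text` modelled as none, `matched` as the some-list
def pvMatchB (pos : PySem.Dict Char (List Int)) : List Char → Int → Option (List Int)
  | [], _ => some []
  | c :: cs, last =>
    let lst := pos.getD c []
    let lo := pvBisect lst last 0 lst.length
    if lo = lst.length then none
    else
      let last' := lst.getD lo 0
      (pvMatchB pos cs last').map (last' :: ·)

def highlight_dragged_crib_alt (text : String) (crib : String) (color : String) : String :=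
  let pos := pvPositions text
  match pvMatchB pos (PySem.Str.lower crib).toList (-1) with
  | none => text
  | some matched =>
      String.join
        (matched.foldl
          (fun rs i => rs.set i.toNat (color ++ String.ofList [PySem.List.pyGetD text.toList i ' '] ++ "\x1b[0m"))
          (text.toList.map (fun ch => String.ofList [ch])))

-- ===== PRECONDITION & SPEC =====
def Spec_highlight_dragged_crib (text : String) (crib : String) (color : String) (out : String) : Prop := out = highlight_dragged_crib_alt text crib color
instance (text : String) (crib : String) (color : String) (out : String) : Decidable (Spec_highlight_dragged_crib text crib color out) := by unfold Spec_highlight_dragged_crib; infer_instance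

-- ===== CLAIM (what is proved, stated in full; the proofs are below) =====
def Claim_equal_highlight_dragged_crib : Prop := ∀ (text : String) (crib : String) (color : String), Dom_highlight_dragged_crib text crib color → Spec_highlight_dragged_crib text crib color (highlight_dragged_crib text crib color)

-- ===== LEMMAS AND PROOFS =====

-- reference greedy matcher (proof-side only): match the crib against the enumerated ORIGINAL
-- text, lowering both sides at the comparison; returns the list of matched indices
def pvSeekR (a : Char) : List (Int × Char) → Option (Int × List (Int × Char))
  | [] => none
  | (i, x) :: ts =>
    if PySem.Chars.lowerChar x == PySem.Chars.lowerChar a then some (i, ts) else pvSeekR a ts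

def pvGm : List Char → List (Int × Char) → Option (List Int)
  | [], _ => some []
  | a :: ws, it =>
    match pvSeekR a it with
    | none => none
    | some (i, it') => (pvGm ws it').map (i :: ·)

-- position list of character c in ys enumerated from s (proof-side)
def pvF (c : Char) (ys : List Char) (s : Int) : List Int :=
  ((PySem.List.enumerate ys s).filter (fun p => PySem.Chars.lowerChar p.2 == c)).map (·.1)

theorem pv_char_le (a b : Char) : a ≤ b ↔ a.toNat ≤ b.toNat := by
  rw [Char.le_def, UInt32.le_iff_toNat_le]; rfl

theorem pv_toNat_ofNat (n : Nat) (h : n < 55296) : (Char.ofNat n).toNat = n := by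
  rw [Char.toNat_ofNat, if_pos]; exact Or.inl h

theorem pv_toNat_inj (a b : Char) (h : a.toNat = b.toNat) : a = b := by
  rw [← Char.ofNat_toNat a, h, Char.ofNat_toNat]

theorem pv_lc_toNat (c : Char) :
    (PySem.Chars.lowerChar c).toNat = if 65 ≤ c.toNat ∧ c.toNat ≤ 90 then c.toNat + 32 else c.toNat := by
  simp only [PySem.Chars.lowerChar, PySem.Chars.isupper, Bool.and_eq_true, decide_eq_true_eq,
    pv_char_le, show 'A'.toNat = 65 from rfl, show 'Z'.toNat = 90 from rfl]
  split_ifs with h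
  · exact pv_toNat_ofNat _ (by omega)
  · rfl

theorem pv_uc_toNat (c : Char) :
    (PySem.Chars.upperChar c).toNat = if 97 ≤ c.toNat ∧ c.toNat ≤ 122 then c.toNat - 32 else c.toNat := by
  simp only [PySem.Chars.upperChar, PySem.Chars.islower, Bool.and_eq_true, decide_eq_true_eq,
    pv_char_le, show 'a'.toNat = 97 from rfl, show 'z'.toNat = 122 from rfl]
  split_ifs with h
  · exact pv_toNat_ofNat _ (by omega)
  · rfl

theorem pv_lc_uc_lc (c : Char) :
    PySem.Chars.lowerChar (PySem.Chars.upperChar (PySem.Chars.lowerChar c)) = PySem.Chars.lowerChar c := by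
  apply pv_toNat_inj
  simp only [pv_lc_toNat, pv_uc_toNat]
  split_ifs <;> omega

theorem pv_uc_lc_beq (a b : Char) :
    (PySem.Chars.upperChar (PySem.Chars.lowerChar a) == PySem.Chars.upperChar (PySem.Chars.lowerChar b))
      = (PySem.Chars.lowerChar a == PySem.Chars.lowerChar b) := by
  by_cases h : PySem.Chars.lowerChar a = PySem.Chars.lowerChar b
  · simp [h]
  · have h2 : PySem.Chars.upperChar (PySem.Chars.lowerChar a) ≠ PySem.Chars.upperChar (PySem.Chars.lowerChar b) := by
      intro he
      exact h (by rw [← pv_lc_uc_lc a, he, pv_lc_uc_lc])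
    simp [h, h2]

theorem pv_seekU_bridge (a : Char) (it : List (Int × Char)) :
    pvSeekU (PySem.Chars.upperChar (PySem.Chars.lowerChar a))
        (it.map (fun p => PySem.Chars.upperChar (PySem.Chars.lowerChar p.2)))
      = (pvSeekR a it).map (fun p => p.2.map (fun q => PySem.Chars.upperChar (PySem.Chars.lowerChar q.2))) := by
  induction it with
  | nil => rfl
  | cons p ts ih =>
    obtain ⟨i, x⟩ := p
    simp only [List.map_cons, pvSeekU, pvSeekR, pv_uc_lc_beq]
    split_ifs with h
    · rfl
    · exact ih

theorem pv_cfw_bridge (ws : List Char) (it : List (Int × Char)) :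
    pvCfw (ws.map (fun c => PySem.Chars.upperChar (PySem.Chars.lowerChar c)))
        (it.map (fun p => PySem.Chars.upperChar (PySem.Chars.lowerChar p.2)))
      = (pvGm ws it).isSome := by
  induction ws generalizing it with
  | nil => rfl
  | cons a ws ih =>
    simp only [List.map_cons, pvCfw, pvGm, pv_seekU_bridge]
    cases h : pvSeekR a it with
    | none => rfl
    | some p => simpa using ih p.2

theorem pv_seekE_bridge (a : Char) (it : List (Int × Char)) :
    pvSeekE (PySem.Chars.lowerChar a) (it.map (fun p => (p.1, PySem.Chars.lowerChar p.2)))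
      = (pvSeekR a it).map (fun p => (p.1, p.2.map (fun q => (q.1, PySem.Chars.lowerChar q.2)))) := by
  induction it with
  | nil => rfl
  | cons p ts ih =>
    obtain ⟨i, x⟩ := p
    simp only [List.map_cons, pvSeekE, pvSeekR]
    split_ifs with h
    · rfl
    · exact ih

theorem pv_loopA_eq (text color : String) (ws : List Char) (it : List (Int × Char)) (m : List Int)
    (rs : List String) (h : pvGm ws it = some m) :
    pvLoopA text color (ws.map PySem.Chars.lowerChar) (it.map (fun p => (p.1, PySem.Chars.lowerChar p.2))) rs
      = m.foldl
          (fun rs i => rs.set i.toNat (color ++ String.ofList [PySem.List.pyGetD text.toList i ' '] ++ "\x1b[0m"))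
          rs := by
  induction ws generalizing it m rs with
  | nil =>
    simp only [pvGm, Option.some.injEq] at h
    subst h; rfl
  | cons a ws ih =>
    cases hs : pvSeekR a it with
    | none => simp [pvGm, hs] at h
    | some p =>
      obtain ⟨i, it'⟩ := p
      cases hg : pvGm ws it' with
      | none => simp [pvGm, hs, hg] at h
      | some m' =>
        simp only [pvGm, hs, hg, Option.map_some, Option.some.injEq] at h
        subst h
        simp only [List.map_cons, pvLoopA, pv_seekE_bridge, hs, Option.map_some]
        rw [ih it' m' _ hg]
        rfl

theorem pv_enumerate_map {α β : Type} (f : α → β) (xs : List α) (s : Int) :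
    PySem.List.enumerate (xs.map f) s = (PySem.List.enumerate xs s).map (fun p => (p.1, f p.2)) := by
  induction xs generalizing s with
  | nil => rfl
  | cons x xs ih => simp [PySem.List.enumerate_cons, ih]

theorem pv_ul_toList (s : String) :
    (PySem.Str.upper (PySem.Str.lower s)).toList
      = s.toList.map (fun c => PySem.Chars.upperChar (PySem.Chars.lowerChar c)) := by
  simp [PySem.Str.toList_upper, PySem.Str.toList_lower, PySem.Chars.upper, PySem.Chars.lower,
    List.map_map, Function.comp]

theorem pv_l_toList (s : String) :
    (PySem.Str.lower s).toList = s.toList.map PySem.Chars.lowerChar := by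
  simp [PySem.Str.toList_lower, PySem.Chars.lower]

-- ===== B-side lemmas =====

-- the positions dict returns exactly the filtered index list
theorem pv_positions_getD (text : String) (c : Char) :
    (pvPositions text).getD c [] = pvF c text.toList 0 := by
  unfold pvPositions pvF
  have hfold : (PySem.List.enumerate text.toList 0).foldl
        (fun d p => d.modify (PySem.Chars.lowerChar p.2) [] (· ++ [p.1])) PySem.Dict.empty
      = ((PySem.List.enumerate text.toList 0).map
            (fun q => (PySem.Chars.lowerChar q.2, q.1))).foldl
          (fun d q => d.modify q.1 [] (· ++ [q.2])) PySem.Dict.empty := by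
    rw [List.foldl_map]
  rw [hfold, PySem.Dict.getD_foldl_modify_append]
  simp [PySem.Dict.getD_empty, List.filter_map, List.map_map, Function.comp_def]

-- elements of pvF lie in [s, s + length)
theorem pv_F_bounds (c : Char) (ys : List Char) (s : Int) :
    ∀ i ∈ pvF c ys s, s ≤ i ∧ i < s + ys.length := by
  induction ys generalizing s with
  | nil => simp [pvF, PySem.List.enumerate_nil]
  | cons y ys ih =>
    intro i hi
    simp only [pvF, PySem.List.enumerate_cons, List.filter_cons] at hi
    simp only [List.length_cons]
    by_cases hc : (PySem.Chars.lowerChar y == c) = true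
    · rw [if_pos hc] at hi
      simp only [List.map_cons, List.mem_cons] at hi
      rcases hi with h | h
      · subst h; push_cast; omega
      · have := ih (s + 1) i h
        push_cast at this ⊢; omega
    · rw [if_neg hc] at hi
      have := ih (s + 1) i hi
      push_cast at this ⊢; omega

-- pvF is strictly increasing
theorem pv_F_sorted (c : Char) (ys : List Char) (s : Int) :
    (pvF c ys s).Pairwise (· < ·) := by
  induction ys generalizing s with
  | nil => simp [pvF, PySem.List.enumerate_nil]
  | cons y ys ih =>
    simp only [pvF, PySem.List.enumerate_cons, List.filter_cons]
    by_cases hc : (PySem.Chars.lowerChar y == c) = true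
    · rw [if_pos hc]
      simp only [List.map_cons]
      refine List.Pairwise.cons ?_ (ih (s + 1))
      intro i hi
      have := pv_F_bounds c ys (s + 1) i hi
      omega
    · rw [if_neg hc]
      exact ih (s + 1)

-- binary-search invariant: if everything before lo is ≤ last and everything from hi on is
-- > last, the result r separates the list the same way
theorem pv_bisect_inv (lst : List Int) (last : Int) (lo hi : Nat)
    (hhi : hi ≤ lst.length)
    (hlo2 : lo ≤ hi)
    (h1 : ∀ k, k < lo → lst.getD k 0 ≤ last)
    (h2 : ∀ k, hi ≤ k → k < lst.length → last < lst.getD k 0)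
    (hs : lst.Pairwise (· < ·)) :
    (∀ k, k < pvBisect lst last lo hi → lst.getD k 0 ≤ last) ∧
    (∀ k, pvBisect lst last lo hi ≤ k → k < lst.length → last < lst.getD k 0) ∧
    pvBisect lst last lo hi ≤ lst.length := by
  have hmono : ∀ j k, j < k → k < lst.length → lst.getD j 0 < lst.getD k 0 := by
    intro j k hjk hk
    have hj : j < lst.length := Nat.lt_trans hjk hk
    rw [List.getD_eq_getElem lst 0 hj, List.getD_eq_getElem lst 0 hk]
    exact (List.pairwise_iff_getElem.mp hs) j k hj hk hjk
  unfold pvBisect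
  split_ifs with h
  · dsimp only
    have hmid1 : (lo + hi) / 2 < hi := by omega
    have hmid2 : lo ≤ (lo + hi) / 2 := by omega
    split_ifs with hc
    · exact pv_bisect_inv lst last ((lo + hi) / 2 + 1) hi hhi (by omega)
        (fun k hk => by
          rcases Nat.lt_or_ge k ((lo + hi) / 2) with h' | h'
          · exact le_of_lt (lt_of_lt_of_le (hmono k _ h' (by omega)) hc)
          · have hke : k = (lo + hi) / 2 := by omega
            rw [hke]; exact hc)
        h2 hs
    · exact pv_bisect_inv lst last lo ((lo + hi) / 2) (by omega) (by omega) h1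
        (fun k hk hklen => by
          rcases Nat.eq_or_lt_of_le hk with h' | h'
          · rw [← h']; omega
          · exact lt_trans (show last < lst.getD ((lo + hi) / 2) 0 by omega)
              (hmono _ k h' hklen))
        hs
  · exact ⟨h1, fun k hk => h2 k (by omega), by omega⟩
termination_by hi - lo
decreasing_by all_goals omega

-- with a split A ++ B where all of A ≤ last < all of B, the search returns A.length
theorem pv_bisect_split (A B : List Int) (last : Int)
    (hA : ∀ i ∈ A, i ≤ last) (hB : ∀ i ∈ B, last < i)
    (hs : (A ++ B).Pairwise (· < ·)) :
    pvBisect (A ++ B) last 0 (A ++ B).length = A.length := by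
  obtain ⟨p1, p2, p3⟩ := pv_bisect_inv (A ++ B) last 0 (A ++ B).length (le_refl _)
    (Nat.zero_le _) (by omega) (by omega) hs
  set r := pvBisect (A ++ B) last 0 (A ++ B).length with hr
  rcases Nat.lt_trichotomy r A.length with h | h | h
  · exfalso
    have hrl : r < (A ++ B).length := by
      rw [List.length_append]; omega
    have hlt := p2 r (le_refl r) hrl
    have hget : (A ++ B).getD r 0 = A[r] := by
      rw [List.getD_eq_getElem _ 0 hrl, List.getElem_append_left h]
    rw [hget] at hlt
    exact absurd hlt (not_lt.mpr (hA _ (List.getElem_mem h)))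
  · exact h
  · exfalso
    have hb : 0 < B.length := by
      rw [List.length_append] at p3; omega
    have hAl : A.length < (A ++ B).length := by
      rw [List.length_append]; omega
    have hle := p1 A.length h
    have hget : (A ++ B).getD A.length 0 = B[0] := by
      rw [List.getD_eq_getElem _ 0 hAl, List.getElem_append_right (le_refl _)]
      simp
    rw [hget] at hle
    exact absurd (hB _ (List.getElem_mem hb)) (not_lt.mpr hle)

-- splitting pvF at a cut point t of the text
theorem pv_F_split (c : Char) (xs : List Char) (t : Nat) (ht : t ≤ xs.length) :
    pvF c xs 0 = pvF c (xs.take t) 0 ++ pvF c (xs.drop t) t := by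
  unfold pvF
  conv_lhs => rw [← List.take_append_drop t xs]
  rw [PySem.List.enumerate_append, List.filter_append, List.map_append]
  have hlen : ((xs.take t).length : Int) = (t : Int) := by
    simp [List.length_take, Nat.min_eq_left ht]
  rw [show (0 : Int) + ((xs.take t).length : Int) = (t : Int) by rw [hlen]; ring]

-- the reference seek on an enumerated suffix finds exactly the head of pvF on that suffix
theorem pv_seekR_none (a : Char) (ys : List Char) (s : Int)
    (h : pvF (PySem.Chars.lowerChar a) ys s = []) :
    pvSeekR a (PySem.List.enumerate ys s) = none := by
  induction ys generalizing s with
  | nil => rfl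
  | cons y ys ih =>
    simp only [pvF, PySem.List.enumerate_cons, List.filter_cons] at h
    by_cases hc : (PySem.Chars.lowerChar y == PySem.Chars.lowerChar a) = true
    · rw [if_pos hc] at h; simp at h
    · rw [if_neg hc] at h
      simp only [PySem.List.enumerate_cons, pvSeekR]
      rw [if_neg hc]
      exact ih (s + 1) h

theorem pv_seekR_cons (a : Char) (ys : List Char) (t : Nat) (i : Int) (rest : List Int)
    (h : pvF (PySem.Chars.lowerChar a) ys (t : Int) = i :: rest) :
    ∃ j : Nat, i = ((t + j : Nat) : Int) ∧ j < ys.length ∧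
      pvSeekR a (PySem.List.enumerate ys (t : Int))
        = some (i, PySem.List.enumerate (ys.drop (j + 1)) (((t + j + 1 : Nat) : Int))) := by
  induction ys generalizing t i rest with
  | nil => simp [pvF, PySem.List.enumerate_nil] at h
  | cons y ys ih =>
    simp only [pvF, PySem.List.enumerate_cons, List.filter_cons] at h
    by_cases hc : (PySem.Chars.lowerChar y == PySem.Chars.lowerChar a) = true
    · rw [if_pos hc] at h
      simp only [List.map_cons, List.cons.injEq] at h
      refine ⟨0, by rw [← h.1]; norm_num, by simp, ?_⟩
      simp only [PySem.List.enumerate_cons, pvSeekR]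
      rw [if_pos hc, ← h.1]
      norm_num
    · rw [if_neg hc] at h
      have h' : pvF (PySem.Chars.lowerChar a) ys ((t + 1 : Nat) : Int) = i :: rest := by
        rw [← h]; unfold pvF
        rw [show ((t + 1 : Nat) : Int) = (t : Int) + 1 by push_cast; ring]
      obtain ⟨j, hj1, hj2, hj3⟩ := ih (t + 1) i rest h'
      refine ⟨j + 1, by push_cast at hj1 ⊢; omega, by simp; omega, ?_⟩
      simp only [PySem.List.enumerate_cons, pvSeekR]
      rw [if_neg hc]
      rw [show ((t : Int) + 1) = ((t + 1 : Nat) : Int) by push_cast; ring, hj3]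
      rw [show (t + 1 + j + 1 : Nat) = (t + (j + 1) + 1 : Nat) by omega, List.drop_succ_cons]

-- main bridge: the reference greedy matcher on the suffix equals B's dict/bisect matcher
theorem pv_match_bridge (text : String) (ws : List Char) (t : Nat)
    (ht : t ≤ text.toList.length) :
    pvGm ws (PySem.List.enumerate (text.toList.drop t) (t : Int))
      = pvMatchB (pvPositions text) (ws.map PySem.Chars.lowerChar) ((t : Int) - 1) := by
  induction ws generalizing t with
  | nil => rfl
  | cons a ws ih =>
    rw [List.map_cons]
    obtain ⟨A, hA⟩ : ∃ A, A = pvF (PySem.Chars.lowerChar a) (text.toList.take t) 0 := ⟨_, rfl⟩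
    obtain ⟨B, hB⟩ : ∃ B, B = pvF (PySem.Chars.lowerChar a) (text.toList.drop t) (t : Int) :=
      ⟨_, rfl⟩
    have hlst : (pvPositions text).getD (PySem.Chars.lowerChar a) [] = A ++ B := by
      rw [pv_positions_getD, pv_F_split _ _ t ht, hA, hB]
    have hsorted : (A ++ B).Pairwise (· < ·) := by
      rw [hA, hB, ← pv_F_split _ _ t ht]
      exact pv_F_sorted _ _ _
    have hAle : ∀ i ∈ A, i ≤ (t : Int) - 1 := by
      rw [hA]; intro i hi
      have h1 := pv_F_bounds _ _ _ i hi
      have h2 : (text.toList.take t).length ≤ t := List.length_take_le t _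
      omega
    have hBgt : ∀ i ∈ B, (t : Int) - 1 < i := by
      rw [hB]; intro i hi
      have h1 := pv_F_bounds _ _ _ i hi
      omega
    have hbis := pv_bisect_split A B ((t : Int) - 1) hAle hBgt hsorted
    simp only [pvMatchB]
    rw [hlst, hbis]
    cases hBc : B with
    | nil =>
      rw [if_pos (by simp)]
      have hnil : pvF (PySem.Chars.lowerChar a) (text.toList.drop t) ((t : Nat) : Int) = [] := by
        rw [← hB]; exact hBc
      simp [pvGm, pv_seekR_none a _ _ hnil]
    | cons i rest =>
      rw [if_neg (by simp)]
      have hget : (A ++ i :: rest).getD A.length 0 = i := by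
        rw [List.getD_eq_getElem _ 0 (by simp), List.getElem_append_right (le_refl _)]
        simp
      rw [hget]
      obtain ⟨j, hj1, hj2, hj3⟩ := pv_seekR_cons a (text.toList.drop t) t i rest
        (by rw [← hB]; exact hBc)
      simp only [pvGm, hj3]
      have harg : (text.toList.drop t).drop (j + 1) = text.toList.drop (t + j + 1) := by
        rw [List.drop_drop]; congr 1; try omega
      rw [harg]
      have hlen : t + j + 1 ≤ text.toList.length := by
        have := List.length_drop (l := text.toList) (i := t)
        omega
      have hrec := ih (t + j + 1) hlen
      rw [show ((t + j + 1 : Nat) : Int) - 1 = i by rw [hj1]; push_cast; ring] at hrec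
      rw [hrec]

theorem pv_main (text crib color : String) :
    highlight_dragged_crib text crib color = highlight_dragged_crib_alt text crib color := by
  unfold highlight_dragged_crib highlight_dragged_crib_alt
  dsimp only
  have hcf : can_form_word (PySem.Str.lower crib) (PySem.Str.lower text)
      = (pvGm crib.toList (PySem.List.enumerate text.toList 0)).isSome := by
    unfold can_form_word
    rw [pv_ul_toList]
    have ht : (PySem.Str.upper (PySem.Str.lower text)).toList
        = (PySem.List.enumerate text.toList 0).map
            (fun p => PySem.Chars.upperChar (PySem.Chars.lowerChar p.2)) := by
      rw [pv_ul_toList]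
      conv_lhs => rw [← PySem.List.map_snd_enumerate text.toList 0]
      rw [List.map_map]; rfl
    rw [ht]
    exact pv_cfw_bridge _ _
  have hbridge : pvGm crib.toList (PySem.List.enumerate text.toList 0)
      = pvMatchB (pvPositions text) (PySem.Str.lower crib).toList (-1) := by
    have := pv_match_bridge text crib.toList 0 (Nat.zero_le _)
    simpa [pv_l_toList] using this
  cases hg : pvGm crib.toList (PySem.List.enumerate text.toList 0) with
  | none =>
    rw [hcf, hg, ← hbridge, hg]
    simp
  | some m =>
    rw [hcf, hg, ← hbridge, hg]
    simp only [Option.isSome_some, Bool.not_true]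
    have harg : PySem.List.enumerate (PySem.Str.lower text).toList 0
        = (PySem.List.enumerate text.toList 0).map (fun p => (p.1, PySem.Chars.lowerChar p.2)) := by
      rw [pv_l_toList, pv_enumerate_map]
    rw [harg, pv_l_toList crib]
    rw [pv_loopA_eq text color crib.toList _ m _ hg]
    simp

-- ===== VERDICT (by name: the statement is the Claim_ definition above) =====
theorem highlight_dragged_crib_spec : Claim_equal_highlight_dragged_crib := by
  intro text crib color _
  exact pv_main text crib color
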